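-- pv_equiv track=rewrite | github.com/richedperson1/DSA | revision/form binary string.py | formString
-- ===== SOURCE A (Python) =====
-- def formString(string, n, ans):
--     if len(string) == n:
--         ans.append(string)
--         return ans
--
--     if string != "":
--         if string[-1] == "0":
--             ans = formString(string+"1", n, ans)
--             ans = formString(string+"0", n, ans)
--         else:
--             ans = formString(string+"0", n, ans)
--
--     else:
--         ans = formString("0", n, ans)
--         ans = formString("1", n, ans)
--
--     return ans
-- ===== SOURCE B (Python) =====
-- def formString(string, n, ans):
--     # Iterative DFS with an explicit stack (same leaf order as the recursion).
--     stack = [string]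
--     while stack:
--         s = stack.pop()
--         if len(s) == n:
--             ans.append(s)
--         else:
--             if s == "":
--                 children = ["0", "1"]
--             elif s[-1] == "0":
--                 children = [s + "1", s + "0"]
--             else:
--                 children = [s + "0"]
--             stack.extend(reversed(children))
--     return ans
-- ===== Notes on version B (the rewrite author's own statement) =====
-- stated objective: alternative
-- what changed: Replaces A's recursion with an explicit-stack iterative DFS that pops a node, appends it when its length reaches n, and otherwise pushes its children in reverse so the leaf order is identical.
import Mathlib
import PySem

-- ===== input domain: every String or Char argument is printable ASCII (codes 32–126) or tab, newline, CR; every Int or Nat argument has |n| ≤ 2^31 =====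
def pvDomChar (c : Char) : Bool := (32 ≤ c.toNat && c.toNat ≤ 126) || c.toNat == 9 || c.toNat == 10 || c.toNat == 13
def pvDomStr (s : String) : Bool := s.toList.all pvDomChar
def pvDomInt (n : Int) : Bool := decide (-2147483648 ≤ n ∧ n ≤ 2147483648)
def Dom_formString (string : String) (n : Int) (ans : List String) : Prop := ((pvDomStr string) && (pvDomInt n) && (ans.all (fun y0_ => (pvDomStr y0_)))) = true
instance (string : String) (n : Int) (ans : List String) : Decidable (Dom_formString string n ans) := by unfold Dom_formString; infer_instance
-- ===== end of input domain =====

-- B replaces A's recursion by an explicit-stack iterative DFS with the same leaf order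
-- (alternative decomposition, same cost). Both versions mutate and return `ans`;
-- the theorems are about the returned value.

-- ===== PORT A =====
-- Recursion of A; `fuel` is only a totality guard: inside Pre_ it is exactly the
-- recursion depth n - len(string) and is never exhausted.
def formStringGo : Nat → String → Int → List String → List String
  | fuel, s, n, ans =>
    if (s.length : Int) = n then ans ++ [s]
    else
      match fuel with
      | 0 => ans
      | fuel + 1 =>
        if s ≠ "" then
          if PySem.Str.pyGet? s (-1) = some '0' then
            formStringGo fuel (s ++ "0") n (formStringGo fuel (s ++ "1") n ans)
          else
            formStringGo fuel (s ++ "0") n ans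
        else
          formStringGo fuel "1" n (formStringGo fuel "0" n ans)

def formString (string : String) (n : Int) (ans : List String) : List String :=
  formStringGo (n - string.length).toNat string n ans

-- ===== PORT B =====
def childrenB (s : String) : List String :=
  if s = "" then ["0", "1"]
  else if PySem.Str.pyGet? s (-1) = some '0' then [s ++ "1", s ++ "0"]
  else [s ++ "0"]

-- The stack's head is its top (pop from the front; `reversed` extend = children in order).
-- `fuel` bounds the number of loop iterations; inside Pre_ it is never exhausted.
def formStringLoop : Nat → List String → Int → List String → List String
  | _, [], _, ans => ans
  | 0, _ :: _, _, ans => ans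
  | fuel + 1, s :: rest, n, ans =>
    if (s.length : Int) = n then formStringLoop fuel rest n (ans ++ [s])
    else formStringLoop fuel (childrenB s ++ rest) n ans

def formString_alt (string : String) (n : Int) (ans : List String) : List String :=
  formStringLoop (2 ^ ((n - string.length).toNat + 1)) [string] n ans

-- ===== PRECONDITION & SPEC =====
-- Pre_ excludes len(string) > n (in particular all n < 0): there Python A recurses
-- forever (RecursionError) and Python B loops forever, so A never returns a value.
def Pre_formString (string : String) (n : Int) (ans : List String) : Prop :=
  (string.length : Int) ≤ n

instance (string : String) (n : Int) (ans : List String) : Decidable (Pre_formString string n ans) := by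
  unfold Pre_formString; infer_instance

def pvWitness_formString : String × Int × List String := ("", 3, [])

def Spec_formString (string : String) (n : Int) (ans : List String) (out : List String) : Prop := out = formString_alt string n ans
instance (string : String) (n : Int) (ans : List String) (out : List String) : Decidable (Spec_formString string n ans out) := by unfold Spec_formString; infer_instance

-- ===== CLAIM (what is proved, stated in full; the proofs are below) =====
def Claim_equal_formString : Prop := ∀ (string : String) (n : Int) (ans : List String), Dom_formString string n ans → Pre_formString string n ans → Spec_formString string n ans (formString string n ans)

-- ===== LEMMAS AND PROOFS =====

-- number-of-iterations bound for the subtree rooted at a string at depth-to-go d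
def pvCost (n : Int) (s : String) : Nat := 2 ^ ((n - s.length).toNat + 1) - 1

theorem pvCost_pos (n : Int) (s : String) : 1 ≤ pvCost n s := by
  unfold pvCost
  have : 1 ≤ 2 ^ ((n - s.length).toNat + 1) - 1 := by
    have h : 2 ≤ 2 ^ ((n - s.length).toNat + 1) := by
      calc 2 = 2 ^ 1 := rfl
        _ ≤ 2 ^ ((n - s.length).toNat + 1) := Nat.pow_le_pow_right (by omega) (by omega)
    omega
  exact this

theorem childrenB_length (s : String) : ∀ t ∈ childrenB s, t.length = s.length + 1 := by
  intro t ht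
  unfold childrenB at ht
  split_ifs at ht with h1 h2
  · subst h1; simp at ht; rcases ht with rfl | rfl <;> decide
  · simp at ht; rcases ht with rfl | rfl <;> · simp [String.length_append]; decide
  · simp at ht; subst ht; simp [String.length_append]; decide

theorem childrenB_length_le (s : String) : (childrenB s).length ≤ 2 := by
  unfold childrenB; split_ifs <;> simp

-- main invariant: with enough fuel the stack loop folds A's recursion over the stack
theorem loop_eq_fold (n : Int) : ∀ (fuel : Nat) (stack : List String) (ans : List String),
    (∀ s ∈ stack, (s.length : Int) ≤ n) →
    (stack.map (pvCost n)).sum ≤ fuel →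
    formStringLoop fuel stack n ans =
      stack.foldl (fun a s => formStringGo (n - s.length).toNat s n a) ans := by
  intro fuel
  induction fuel with
  | zero =>
    intro stack ans hmem hc
    match stack with
    | [] => rfl
    | s :: rest =>
      exfalso
      have h1 := pvCost_pos n s
      simp [List.map_cons] at hc
      omega
  | succ fuel ih =>
    intro stack ans hmem hc
    match stack with
    | [] => rfl
    | s :: rest =>
      have hs : (s.length : Int) ≤ n := hmem s (by simp)
      have hrest : ∀ t ∈ rest, (t.length : Int) ≤ n := fun t ht => hmem t (by simp [ht])
      simp only [List.map_cons, List.sum_cons] at hc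
      by_cases heq : (s.length : Int) = n
      · -- leaf: append and continue
        have hd0 : (n - s.length).toNat = 0 := by omega
        have h1 := pvCost_pos n s
        rw [formStringLoop, if_pos heq]
        rw [ih rest (ans ++ [s]) hrest (by omega)]
        simp only [List.foldl_cons, hd0]
        rw [formStringGo, if_pos heq]
      · -- interior node: expand children
        have hlt : (s.length : Int) < n := lt_of_le_of_ne hs heq
        obtain ⟨m, hm⟩ : ∃ m, (n - s.length).toNat = m + 1 := ⟨(n - s.length).toNat - 1, by omega⟩
        have hchfuel : ∀ t ∈ childrenB s, (n - (t.length : Int)).toNat = m := by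
          intro t ht
          rw [childrenB_length s t ht]
          push_cast
          omega
        have hchild_mem : ∀ t ∈ childrenB s, (t.length : Int) ≤ n := by
          intro t ht
          rw [childrenB_length s t ht]
          push_cast
          omega
        have hcost_t : ∀ t ∈ childrenB s, pvCost n t = 2 ^ (m + 1) - 1 := by
          intro t ht
          unfold pvCost
          rw [hchfuel t ht]
        have hchild_cost : ((childrenB s).map (pvCost n)).sum ≤ pvCost n s - 1 := by
          have hconst : (childrenB s).map (pvCost n) =
              (childrenB s).map (fun _ => 2 ^ (m + 1) - 1) := List.map_congr_left hcost_t
          have hsum : ((childrenB s).map (pvCost n)).sum =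
              (childrenB s).length * (2 ^ (m + 1) - 1) := by
            rw [hconst]
            simp [List.map_const']
          rw [hsum]
          have hpow : 1 ≤ 2 ^ (m + 1) := Nat.one_le_two_pow
          have hmul : (childrenB s).length * (2 ^ (m + 1) - 1) ≤ 2 * (2 ^ (m + 1) - 1) :=
            Nat.mul_le_mul_right _ (childrenB_length_le s)
          unfold pvCost
          rw [hm]
          have hp2 : 2 ^ (m + 1 + 1) = 2 * 2 ^ (m + 1) := by ring
          rw [hp2]
          omega
        have hcost' : ((childrenB s ++ rest).map (pvCost n)).sum ≤ fuel := by
          rw [List.map_append, List.sum_append]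
          have := pvCost_pos n s
          omega
        rw [formStringLoop, if_neg heq]
        rw [ih (childrenB s ++ rest) ans
              (by intro t ht; rcases List.mem_append.mp ht with h | h
                  · exact hchild_mem t h
                  · exact hrest t h) hcost']
        rw [List.foldl_append, List.foldl_cons]
        congr 1
        -- foldl over children = one unfolding of A's recursion
        have hgo : formStringGo ((n - s.length).toNat) s n ans =
            (childrenB s).foldl (fun a t => formStringGo (n - t.length).toNat t n a) ans := by
          rw [hm, formStringGo, if_neg heq]
          unfold childrenB
          by_cases hse : s = ""
          · rw [if_pos hse]
            simp only [ne_eq, hse, not_true_eq_false, if_false, List.foldl_cons, List.foldl_nil]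
            have h0 : (n - (("0" : String).length : Int)).toNat = m := by
              apply hchfuel; unfold childrenB; rw [if_pos hse]; simp
            have h1 : (n - (("1" : String).length : Int)).toNat = m := by
              apply hchfuel; unfold childrenB; rw [if_pos hse]; simp
            rw [h0, h1]
          · rw [if_neg hse]
            simp only [ne_eq, hse, not_false_eq_true, if_true]
            by_cases hlast : PySem.Str.pyGet? s (-1) = some '0'
            · rw [if_pos hlast, if_pos hlast]
              have h0 : (n - ((s ++ "0" : String).length : Int)).toNat = m := by
                apply hchfuel; unfold childrenB; rw [if_neg hse, if_pos hlast]; simp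
              have h1 : (n - ((s ++ "1" : String).length : Int)).toNat = m := by
                apply hchfuel; unfold childrenB; rw [if_neg hse, if_pos hlast]; simp
              simp only [List.foldl_cons, List.foldl_nil, h0, h1]
            · rw [if_neg hlast, if_neg hlast]
              have h0 : (n - ((s ++ "0" : String).length : Int)).toNat = m := by
                apply hchfuel; unfold childrenB; rw [if_neg hse, if_neg hlast]; simp
              simp only [List.foldl_cons, List.foldl_nil, h0]
        exact hgo.symm

-- ===== VERDICT (by name: the statement is the Claim_ definition above) =====
theorem formString_spec : Claim_equal_formString := by
  intro string n ans _ hpre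
  unfold Spec_formString formString formString_alt
  rw [loop_eq_fold n (2 ^ ((n - string.length).toNat + 1)) [string] ans
        (by intro s hs; simp at hs; subst hs; exact hpre)
        (by simp only [List.map_cons, List.map_nil, List.sum_cons, List.sum_nil]
            unfold pvCost; exact Nat.sub_le _ _)]
  simp
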